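-- pv_equiv track=rewrite | github.com/MichalLejza/PJWSTK | PPY/Cwiczenia/Cwiczenia4/TicTacToe.py | checkIfAnyRowIsEmpty
-- ===== SOURCE A (Python) =====
-- def checkIfAnyRowIsEmpty(plansza):
--     counterRows = 0
--     for i in range(len(plansza)):
--         znakRows = plansza[i][0]
--         for j in range(len(plansza[i])):
--             if plansza[i][j] == znakRows and plansza[i][j] != '0':
--                 counterRows += 1
--         if counterRows == len(plansza[i]):
--             return True
--         else:
--             counterRows = 0
--     return False
-- ===== SOURCE B (Python) =====
-- def checkIfAnyRowIsEmpty(plansza):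
--     if not plansza:
--         return False
--     row = plansza[0]
--     first = row[0]
--     if first != '0' and row[1:] == row[:-1]:
--         return True
--     return checkIfAnyRowIsEmpty(plansza[1:])
-- ===== Notes on version B (the rewrite author's own statement) =====
-- stated objective: alternative
-- what changed: Replaces A's iterative per-row counter loop (count cells equal to row[0] and != '0', compare against the row length) by structural recursion over the board whose per-row uniformity test is a whole-slice shift comparison row[1:] == row[:-1] (all adjacent cells equal), with no counting at all.
import Mathlib
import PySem

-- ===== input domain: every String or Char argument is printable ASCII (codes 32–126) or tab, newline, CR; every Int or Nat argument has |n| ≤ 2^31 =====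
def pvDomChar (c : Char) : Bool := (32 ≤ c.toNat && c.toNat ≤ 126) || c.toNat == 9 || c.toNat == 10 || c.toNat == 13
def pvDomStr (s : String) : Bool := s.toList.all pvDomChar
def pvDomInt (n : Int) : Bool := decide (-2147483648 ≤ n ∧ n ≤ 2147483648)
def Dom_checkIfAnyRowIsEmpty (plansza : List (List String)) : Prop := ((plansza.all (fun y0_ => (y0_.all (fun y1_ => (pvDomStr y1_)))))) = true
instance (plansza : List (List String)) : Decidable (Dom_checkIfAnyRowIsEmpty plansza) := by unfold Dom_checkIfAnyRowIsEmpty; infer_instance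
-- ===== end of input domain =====

-- B replaces A's per-row counter loop by structural recursion with a shift-slice uniformity test (objective: alternative).

-- ===== PORT A =====
-- A's inner loop: count the cells equal to znak and different from '0'.
def pvCountA (row : List String) (znak : String) : Int :=
  row.foldl (fun c cell => if cell = znak ∧ cell ≠ "0" then c + 1 else c) 0

def checkIfAnyRowIsEmpty (plansza : List (List String)) : Bool :=
  match plansza with
  | [] => false
  | row :: rest =>
    match PySem.List.pyGet? row 0 with
    | none => false   -- IndexError in Python: outside Pre_
    | some znak =>
      if pvCountA row znak = (row.length : Int) then true
      else checkIfAnyRowIsEmpty rest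

-- ===== PORT B =====
def checkIfAnyRowIsEmpty_alt (plansza : List (List String)) : Bool :=
  match plansza with
  | [] => false
  | row :: rest =>
    match PySem.List.pyGet? row 0 with
    | none => false   -- IndexError in Python: outside Pre_
    | some first =>
      if first ≠ "0" ∧ PySem.List.slice row (some 1) none = PySem.List.slice row none (some (-1))
      then true
      else checkIfAnyRowIsEmpty_alt (PySem.List.slice (row :: rest) (some 1) none)  -- plansza[1:]
termination_by plansza.length
decreasing_by rw [PySem.List.slice_from_one]; simp

-- ===== PRECONDITION & SPEC =====
-- a row on which A returns True: nonempty, uniform and not filled with '0'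
def pvWinRow (row : List String) : Prop :=
  row ≠ [] ∧ row.head! ≠ "0" ∧ ∀ c ∈ row, c = row.head!

-- Pre_ excludes exactly the boards on which A raises IndexError: an empty row that is
-- not preceded by a winning row (both A and B raise there, at 'plansza[i][0]' / 'row[0]').
def Pre_checkIfAnyRowIsEmpty (plansza : List (List String)) : Prop :=
  ∀ i < plansza.length, plansza[i]! = [] → ∃ j < i, pvWinRow plansza[j]!

instance (plansza : List (List String)) : Decidable (Pre_checkIfAnyRowIsEmpty plansza) := by
  unfold Pre_checkIfAnyRowIsEmpty pvWinRow; infer_instance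

def pvWitness_checkIfAnyRowIsEmpty : List (List String) := [["X", "X"], ["0"]]

def Spec_checkIfAnyRowIsEmpty (plansza : List (List String)) (out : Bool) : Prop := out = checkIfAnyRowIsEmpty_alt plansza
instance (plansza : List (List String)) (out : Bool) : Decidable (Spec_checkIfAnyRowIsEmpty plansza out) := by unfold Spec_checkIfAnyRowIsEmpty; infer_instance

-- ===== CLAIM (what is proved, stated in full; the proofs are below) =====
def Claim_equal_checkIfAnyRowIsEmpty : Prop := ∀ (plansza : List (List String)), Dom_checkIfAnyRowIsEmpty plansza → Pre_checkIfAnyRowIsEmpty plansza → Spec_checkIfAnyRowIsEmpty plansza (checkIfAnyRowIsEmpty plansza)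

-- ===== LEMMAS AND PROOFS =====

-- A's counter is the countP of the row
theorem pvCountA_eq_countP (row : List String) (znak : String) :
    pvCountA row znak = (row.countP (fun cell => cell = znak && cell ≠ "0") : Int) := by
  unfold pvCountA
  suffices h : ∀ (init : Int), row.foldl (fun c cell => if cell = znak ∧ cell ≠ "0" then c + 1 else c) init
      = init + (row.countP (fun cell => cell = znak && cell ≠ "0") : Int) by
    simpa using h 0
  induction row with
  | nil => intro init; simp
  | cons b t ih =>
    intro init
    rw [List.foldl_cons, List.countP_cons]
    by_cases h : b = znak ∧ b ≠ "0"
    · have hd : (decide (b = znak) && decide (b ≠ "0")) = true := by simp [h.1, h.1 ▸ h.2]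
      rw [if_pos h, ih, hd, if_pos rfl]
      push_cast; ring
    · have hd : (decide (b = znak) && decide (b ≠ "0")) = false := by
        simp only [Bool.and_eq_false_iff, decide_eq_false_iff_not]
        tauto
      rw [if_neg h, ih, hd, if_neg (by simp)]
      push_cast; ring

-- A's win condition for a nonempty row
theorem pvA_win_iff (a : String) (t : List String) :
    (pvCountA (a :: t) a = ((a :: t).length : Int)) ↔
      (∀ c ∈ a :: t, c = a ∧ c ≠ "0") := by
  rw [pvCountA_eq_countP, Int.natCast_inj, List.countP_eq_length]
  constructor
  · intro h c hc
    have := h c hc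
    simpa using this
  · intro h c hc
    have := h c hc
    simp [this.1, this.1 ▸ this.2]

-- B's shift comparison: tail = dropLast iff the row is uniform
theorem pvShift_iff (a : String) (t : List String) :
    (t = (a :: t).dropLast) ↔ (∀ c ∈ a :: t, c = a) := by
  induction t generalizing a with
  | nil => simp
  | cons b u ih =>
    rw [List.dropLast_cons₂, List.cons_eq_cons, ih b]
    constructor
    · rintro ⟨hb, h⟩ c hc
      rcases List.mem_cons.mp hc with h1 | h1
      · exact h1
      · rw [h c h1, hb]
    · intro h
      refine ⟨h b (by simp), fun c hc => ?_⟩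
      rw [h c (List.mem_cons_of_mem _ hc)]
      exact (h b (by simp)).symm

-- the two per-row conditions agree
theorem pvCond_iff (a : String) (t : List String) :
    (pvCountA (a :: t) a = ((a :: t).length : Int)) ↔
      (a ≠ "0" ∧ PySem.List.slice (a :: t) (some 1) none = PySem.List.slice (a :: t) none (some (-1))) := by
  rw [pvA_win_iff, PySem.List.slice_from_one, PySem.List.slice_to_neg_one]
  show _ ↔ (a ≠ "0" ∧ t = (a :: t).dropLast)
  rw [pvShift_iff]
  constructor
  · intro h
    exact ⟨(h a (by simp)).2, fun c hc => (h c hc).1⟩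
  · rintro ⟨ha, h⟩ c hc
    exact ⟨h c hc, by rw [h c hc]; exact ha⟩

-- Pre_ passes to the tail when the head row does not win
theorem pvPre_tail (row : List String) (rest : List (List String))
    (hpre : Pre_checkIfAnyRowIsEmpty (row :: rest)) (hnw : ¬ pvWinRow row) :
    Pre_checkIfAnyRowIsEmpty rest := by
  intro i hi hrow
  have h := hpre (i + 1) (by simpa using Nat.succ_lt_succ hi) (by simpa using hrow)
  obtain ⟨j, hj, hwin⟩ := h
  match j with
  | 0 => exact absurd (by simpa using hwin) hnw
  | k + 1 => exact ⟨k, by omega, by simpa using hwin⟩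

theorem pvMain (plansza : List (List String)) (hpre : Pre_checkIfAnyRowIsEmpty plansza) :
    checkIfAnyRowIsEmpty plansza = checkIfAnyRowIsEmpty_alt plansza := by
  induction plansza with
  | nil => simp [checkIfAnyRowIsEmpty, checkIfAnyRowIsEmpty_alt]
  | cons row rest ih =>
    cases row with
    | nil =>
      exact absurd (hpre 0 (by simp) (by simp)) (by simp)
    | cons a t =>
      have hget : PySem.List.pyGet? (a :: t) (0 : Int) = some a := by
        simp [PySem.List.pyGet?, PySem.List.pyIdx?]
      have hrest : PySem.List.slice ((a :: t) :: rest) (some 1) none = rest := by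
        rw [PySem.List.slice_from_one]; rfl
      rw [checkIfAnyRowIsEmpty]
      rw [show checkIfAnyRowIsEmpty_alt ((a :: t) :: rest) =
          (if a ≠ "0" ∧ PySem.List.slice (a :: t) (some 1) none = PySem.List.slice (a :: t) none (some (-1))
           then true else checkIfAnyRowIsEmpty_alt rest) from by
        conv_lhs => rw [checkIfAnyRowIsEmpty_alt]
        rw [hget, hrest]]
      rw [hget]
      simp only
      by_cases hc : pvCountA (a :: t) a = (((a :: t) : List String).length : Int)
      · rw [if_pos hc, if_pos ((pvCond_iff a t).mp hc)]
      · rw [if_neg hc, if_neg (fun h => hc ((pvCond_iff a t).mpr h))]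
        have hnw : ¬ pvWinRow (a :: t) := by
          intro hw
          apply hc
          rw [pvA_win_iff]
          intro c hcm
          have h1 := hw.2.2 c hcm
          simp only [List.head!] at h1 hw
          exact ⟨h1, by rw [h1]; exact hw.2.1⟩
        exact ih (pvPre_tail _ _ hpre hnw)

-- ===== VERDICT (by name: the statement is the Claim_ definition above) =====
theorem checkIfAnyRowIsEmpty_spec : Claim_equal_checkIfAnyRowIsEmpty := by
  intro plansza _ hpre
  unfold Spec_checkIfAnyRowIsEmpty
  exact pvMain plansza hpre
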